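-- pv_equiv track=rewrite | github.com/ari-r-1/email-duplicate-cleaner | email_duplicate_cleaner_flask.py | separate_emails
-- ===== SOURCE A (Python) =====
-- def separate_emails(email_list):
--     seen = set()
--     duplicates = set()
--     for email in email_list:
--         if email in seen:
--             duplicates.add(email)
--         else:
--             seen.add(email)
--     return sorted(seen), sorted(duplicates)
-- ===== SOURCE B (Python) =====
-- def separate_emails(email_list):
--     # Sort first; equal emails become adjacent, so one scan comparing each
--     # element with its predecessor yields both lists already sorted.
--     uniques = []
--     duplicates = []
--     prev = None
--     prev_is_dup = False
--     for e in sorted(email_list):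
--         if e != prev:
--             uniques.append(e)
--             prev_is_dup = False
--         elif not prev_is_dup:
--             duplicates.append(e)
--             prev_is_dup = True
--         prev = e
--     return uniques, duplicates
-- ===== Notes on version B (the rewrite author's own statement) =====
-- stated objective: alternative
-- what changed: Replaces A's hash-set membership loop plus two final sorts with sort-then-scan: sort once, then a single adjacent-comparison pass emits uniques and duplicates already in order, with no sets and no post-sorting.
import Mathlib
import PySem

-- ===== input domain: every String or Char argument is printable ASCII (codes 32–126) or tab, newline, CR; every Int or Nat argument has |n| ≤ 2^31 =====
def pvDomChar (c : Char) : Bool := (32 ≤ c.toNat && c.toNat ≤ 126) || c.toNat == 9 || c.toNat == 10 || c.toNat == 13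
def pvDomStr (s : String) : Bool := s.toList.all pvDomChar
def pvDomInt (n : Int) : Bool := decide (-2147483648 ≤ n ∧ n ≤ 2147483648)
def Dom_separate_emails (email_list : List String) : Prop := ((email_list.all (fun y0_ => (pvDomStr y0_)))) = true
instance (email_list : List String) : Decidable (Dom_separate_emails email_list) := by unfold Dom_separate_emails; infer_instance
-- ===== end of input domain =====

-- B sorts once and then emits uniques/duplicates in a single adjacent-comparison scan
-- (no sets, no post-sorting), instead of A's two-set membership loop plus two sorts.

-- ===== PORT A =====
def separate_emails (email_list : List String) : List String × List String :=
  let st := email_list.foldl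
    (fun (sd : PySem.Set String × PySem.Set String) email =>
      if PySem.Set.contains sd.1 email then (sd.1, PySem.Set.add sd.2 email)
      else (PySem.Set.add sd.1 email, sd.2))
    (PySem.Set.empty, PySem.Set.empty)
  (PySem.List.sorted st.1 (fun x => x) false, PySem.List.sorted st.2 (fun x => x) false)

-- ===== PORT B =====
-- state = (uniques, duplicates, prev, prev_is_dup); prev : Option String (None before the loop)
def separate_emails_alt (email_list : List String) : List String × List String :=
  let st := (PySem.List.sorted email_list (fun x => x) false).foldl
    (fun (st : List String × List String × Option String × Bool) e =>
      if some e ≠ st.2.2.1 then (st.1 ++ [e], st.2.1, some e, false)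
      else if !st.2.2.2 then (st.1, st.2.1 ++ [e], some e, true)
      else (st.1, st.2.1, some e, st.2.2.2))
    ([], [], none, false)
  (st.1, st.2.1)

-- ===== PRECONDITION & SPEC =====
def Spec_separate_emails (email_list : List String) (out : List String × List String) : Prop := out = separate_emails_alt email_list
instance (email_list : List String) (out : List String × List String) : Decidable (Spec_separate_emails email_list out) := by unfold Spec_separate_emails; infer_instance

-- ===== CLAIM (what is proved, stated in full; the proofs are below) =====
def Claim_equal_separate_emails : Prop := ∀ (email_list : List String), Dom_separate_emails email_list → Spec_separate_emails email_list (separate_emails email_list)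

-- ===== LEMMAS AND PROOFS =====

-- A's loop body, named for the lemmas below.
def sepAstep (sd : PySem.Set String × PySem.Set String) (email : String) :
    PySem.Set String × PySem.Set String :=
  if PySem.Set.contains sd.1 email then (sd.1, PySem.Set.add sd.2 email)
  else (PySem.Set.add sd.1 email, sd.2)

theorem sepAstep_eq (sd : PySem.Set String × PySem.Set String) (email : String) :
    (fun (sd : PySem.Set String × PySem.Set String) email =>
      if PySem.Set.contains sd.1 email then (sd.1, PySem.Set.add sd.2 email)
      else (PySem.Set.add sd.1 email, sd.2)) sd email = sepAstep sd email := rfl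

theorem sepAstep_pos (s d : PySem.Set String) (x : String) (h : x ∈ s) :
    sepAstep (s, d) x = (s, PySem.Set.add d x) := by
  unfold sepAstep
  exact if_pos ((PySem.Set.contains_iff s x).mpr h)

theorem sepAstep_neg (s d : PySem.Set String) (x : String) (h : x ∉ s) :
    sepAstep (s, d) x = (PySem.Set.add s x, d) := by
  unfold sepAstep
  exact if_neg (fun hc => h ((PySem.Set.contains_iff s x).mp hc))

-- A's loop: first component accumulates set(prefix).
theorem sepA_fold_fst (xs : List String) (s d : PySem.Set String) :
    (xs.foldl sepAstep (s, d)).1 = PySem.Set.update s xs := by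
  induction xs generalizing s d with
  | nil => simp [PySem.Set.update]
  | cons x xs ih =>
    rw [List.foldl_cons, PySem.Set.update_cons]
    by_cases hx : x ∈ s
    · rw [sepAstep_pos s d x hx, ih, PySem.Set.add_of_mem hx]
    · rw [sepAstep_neg s d x hx]
      exact ih _ _

-- A's loop: membership in the duplicates component — exactly the repeated elements.
theorem sepA_fold_snd_mem (xs : List String) (s d : PySem.Set String) (y : String) :
    (y ∈ (xs.foldl sepAstep (s, d)).2) ↔
    (y ∈ d ∨ (y ∈ s ∧ y ∈ xs) ∨ 2 ≤ xs.count y) := by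
  induction xs generalizing s d with
  | nil => simp
  | cons x xs ih =>
    rw [List.foldl_cons]
    by_cases hx : x ∈ s
    · rw [sepAstep_pos s d x hx, ih]
      by_cases hyx : y = x
      · subst hyx
        simp only [PySem.Set.mem_add, List.mem_cons, List.count_cons]
        constructor
        · intro _; exact Or.inr (Or.inl ⟨hx, Or.inl trivial⟩)
        · intro _; exact Or.inl (Or.inr trivial)
      · have hxy : (x == y) = false := beq_false_of_ne (fun h => hyx h.symm)
        simp only [PySem.Set.mem_add, List.mem_cons, List.count_cons, hxy, hyx,
          or_false, false_or]
        tauto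
    · rw [sepAstep_neg s d x hx, ih]
      by_cases hyx : y = x
      · subst hyx
        have hxy : (y == y) = true := beq_self_eq_true y
        simp only [PySem.Set.mem_add, List.mem_cons, List.count_cons, hxy, if_true]
        have hcnt : y ∈ xs ↔ 1 ≤ xs.count y := List.one_le_count_iff.symm
        constructor
        · rintro (h | ⟨(hs | _), hm⟩ | hc)
          · exact Or.inl h
          · exact absurd hs hx
          · refine Or.inr (Or.inr ?_)
            have := hcnt.mp hm; omega
          · exact Or.inr (Or.inr (by omega))
        · rintro (h | ⟨hs, _⟩ | hc)
          · exact Or.inl h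
          · exact absurd hs hx
          · by_cases hm : y ∈ xs
            · exact Or.inr (Or.inl ⟨Or.inr trivial, hm⟩)
            · have := List.count_eq_zero_of_not_mem hm; omega
      · have hxy : (x == y) = false := beq_false_of_ne (fun h => hyx h.symm)
        simp only [PySem.Set.mem_add, List.mem_cons, List.count_cons, hxy, hyx,
          or_false, false_or]
        tauto

theorem sepA_fold_snd_nodup (xs : List String) (s d : PySem.Set String) (hd : d.Nodup) :
    (xs.foldl sepAstep (s, d)).2.Nodup := by
  induction xs generalizing s d with
  | nil => exact hd
  | cons x xs ih =>
    rw [List.foldl_cons]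
    by_cases hx : x ∈ s
    · rw [sepAstep_pos s d x hx]; exact ih _ _ (PySem.Set.nodup_add d x hd)
    · rw [sepAstep_neg s d x hx]; exact ih _ _ hd

-- B's loop body, named.
def sepBstep (st : List String × List String × Option String × Bool) (e : String) :
    List String × List String × Option String × Bool :=
  if some e ≠ st.2.2.1 then (st.1 ++ [e], st.2.1, some e, false)
  else if !st.2.2.2 then (st.1, st.2.1 ++ [e], some e, true)
  else (st.1, st.2.1, some e, st.2.2.2)

theorem sepBstep_eq (st : List String × List String × Option String × Bool) (e : String) :
    (fun (st : List String × List String × Option String × Bool) e =>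
      if some e ≠ st.2.2.1 then (st.1 ++ [e], st.2.1, some e, false)
      else if !st.2.2.2 then (st.1, st.2.1 ++ [e], some e, true)
      else (st.1, st.2.1, some e, st.2.2.2)) st e = sepBstep st e := rfl

-- pure recursive characterisations of the two output lists of B's scan
def specU (p : Option String) (s : List String) : List String :=
  match s with
  | [] => []
  | e :: t => if some e = p then specU (some e) t else e :: specU (some e) t

def specD (p : Option String) (pd : Bool) (s : List String) : List String :=
  match s with
  | [] => []
  | e :: t =>
    if some e = p then
      (if pd then specD (some e) true t else e :: specD (some e) true t)
    else specD (some e) false t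

theorem sepBstep_ne (u d : List String) (p : Option String) (pd : Bool) (e : String)
    (h : some e ≠ p) : sepBstep (u, d, p, pd) e = (u ++ [e], d, some e, false) := by
  unfold sepBstep; rw [if_pos h]

theorem sepBstep_eq_false (u d : List String) (p : Option String) (e : String)
    (h : some e = p) : sepBstep (u, d, p, false) e = (u, d ++ [e], some e, true) := by
  unfold sepBstep
  rw [if_neg (by simpa using h)]; rfl

theorem sepBstep_eq_true (u d : List String) (p : Option String) (e : String)
    (h : some e = p) : sepBstep (u, d, p, true) e = (u, d, some e, true) := by
  unfold sepBstep
  rw [if_neg (by simpa using h)]; rfl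

theorem sepB_fold_fst (s : List String) (u d : List String) (p : Option String) (pd : Bool) :
    (s.foldl sepBstep (u, d, p, pd)).1 = u ++ specU p s := by
  induction s generalizing u d p pd with
  | nil => simp [specU]
  | cons e t ih =>
    rw [List.foldl_cons]
    by_cases h : some e = p
    · rw [specU, if_pos h]
      cases pd
      · rw [sepBstep_eq_false u d p e h, ih]
      · rw [sepBstep_eq_true u d p e h, ih]
    · rw [specU, if_neg h, sepBstep_ne u d p pd e h, ih, List.append_assoc]
      rfl

theorem sepB_fold_snd (s : List String) (u d : List String) (p : Option String) (pd : Bool) :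
    (s.foldl sepBstep (u, d, p, pd)).2.1 = d ++ specD p pd s := by
  induction s generalizing u d p pd with
  | nil => simp [specD]
  | cons e t ih =>
    rw [List.foldl_cons]
    by_cases h : some e = p
    · rw [specD, if_pos h]
      cases pd
      · rw [if_neg (by simp), sepBstep_eq_false u d p e h, ih, List.append_assoc]
        rfl
      · rw [if_pos rfl, sepBstep_eq_true u d p e h, ih]
    · rw [specD, if_neg h, sepBstep_ne u d p pd e h, ih]

-- specU over a sorted tail with a lower bound x: strictly increasing, strictly above x,
-- contains exactly the elements ≠ x.
theorem specU_some_char (s : List String) (x : String)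
    (hs : s.Pairwise (· ≤ ·)) (hx : ∀ y ∈ s, x ≤ y) :
    (specU (some x) s).Pairwise (· < ·) ∧
    (∀ z, z ∈ specU (some x) s ↔ (z ∈ s ∧ z ≠ x)) ∧
    (∀ z ∈ specU (some x) s, x < z) := by
  induction s generalizing x with
  | nil => simp [specU]
  | cons e t ih =>
    have he : ∀ y ∈ t, e ≤ y := fun y hy => (List.pairwise_cons.mp hs).1 y hy
    have ht : t.Pairwise (· ≤ ·) := (List.pairwise_cons.mp hs).2
    unfold specU
    by_cases h : some e = x
    · have hex : e = x := Option.some_inj.mp h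
      subst hex
      obtain ⟨h1, h2, h3⟩ := ih e ht he
      rw [if_pos rfl]
      refine ⟨h1, fun z => ?_, h3⟩
      rw [h2 z]
      constructor
      · rintro ⟨hz, hne⟩; exact ⟨List.mem_cons_of_mem _ hz, hne⟩
      · rintro ⟨hz, hne⟩
        rcases List.mem_cons.mp hz with rfl | hz
        · exact absurd rfl hne
        · exact ⟨hz, hne⟩
    · have hne : e ≠ x := fun hh => h (by rw [hh])
      have hxe : x < e := lt_of_le_of_ne (hx e (List.mem_cons_self)) (Ne.symm hne)
      obtain ⟨h1, h2, h3⟩ := ih e ht he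
      rw [if_neg h]
      refine ⟨?_, fun z => ?_, ?_⟩
      · exact List.pairwise_cons.mpr ⟨fun z hz => h3 z hz, h1⟩
      · simp only [List.mem_cons, h2]
        constructor
        · rintro (rfl | ⟨hz, hze⟩)
          · exact ⟨Or.inl rfl, hne⟩
          · refine ⟨Or.inr hz, fun hzx => ?_⟩
            have hez : e < z := h3 z ((h2 z).mpr ⟨hz, hze⟩)
            subst hzx
            exact lt_irrefl z (lt_trans hxe hez)
        · rintro ⟨(rfl | hz), hzx⟩
          · exact Or.inl rfl
          · by_cases hze : z = e
            · exact Or.inl hze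
            · exact Or.inr ⟨hz, hze⟩
      · intro z hz
        rcases List.mem_cons.mp hz with rfl | hz
        · exact hxe
        · exact lt_trans hxe (h3 z hz)

theorem specU_none_char (s : List String) (hs : s.Pairwise (· ≤ ·)) :
    (specU none s).Pairwise (· < ·) ∧ (∀ z, z ∈ specU none s ↔ z ∈ s) := by
  cases s with
  | nil => simp [specU]
  | cons e t =>
    have he : ∀ y ∈ t, e ≤ y := fun y hy => (List.pairwise_cons.mp hs).1 y hy
    have ht : t.Pairwise (· ≤ ·) := (List.pairwise_cons.mp hs).2
    obtain ⟨h1, h2, h3⟩ := specU_some_char t e ht he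
    unfold specU
    rw [if_neg (by simp)]
    refine ⟨List.pairwise_cons.mpr ⟨fun z hz => h3 z hz, h1⟩, fun z => ?_⟩
    simp only [List.mem_cons, h2]
    constructor
    · rintro (rfl | ⟨hz, _⟩)
      · exact Or.inl rfl
      · exact Or.inr hz
    · rintro (rfl | hz)
      · exact Or.inl rfl
      · by_cases hze : z = e
        · exact Or.inl hze
        · exact Or.inr ⟨hz, hze⟩

-- counting helpers
theorem count_cons_ne (z e : String) (t : List String) (h : z ≠ e) :
    (e :: t).count z = t.count z := by
  simp [Ne.symm h]

theorem count_cons_self' (e : String) (t : List String) :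
    (e :: t).count e = t.count e + 1 := by
  simp

-- specD over a sorted tail with a lower bound x.
theorem specD_some_char (s : List String) (x : String) (pd : Bool)
    (hs : s.Pairwise (· ≤ ·)) (hx : ∀ y ∈ s, x ≤ y) :
    (specD (some x) pd s).Pairwise (· < ·) ∧
    (∀ z, z ∈ specD (some x) pd s ↔
      (z ∈ s ∧ (if pd then z ≠ x ∧ 2 ≤ s.count z else (z = x ∨ 2 ≤ s.count z)))) ∧
    (∀ z ∈ specD (some x) pd s, x ≤ z) := by
  induction s generalizing x pd with
  | nil => simp [specD]
  | cons e t ih =>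
    have he : ∀ y ∈ t, e ≤ y := fun y hy => (List.pairwise_cons.mp hs).1 y hy
    have ht : t.Pairwise (· ≤ ·) := (List.pairwise_cons.mp hs).2
    have h2T : ∀ z, z ∈ specD (some e) true t ↔ (z ∈ t ∧ z ≠ e ∧ 2 ≤ t.count z) := by
      intro z; rw [(ih e true ht he).2.1 z]; simp
    have h2F : ∀ z, z ∈ specD (some e) false t ↔ (z ∈ t ∧ (z = e ∨ 2 ≤ t.count z)) := by
      intro z; rw [(ih e false ht he).2.1 z]; simp
    unfold specD
    by_cases h : some e = x
    · have hex : e = x := Option.some_inj.mp h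
      subst hex
      rw [if_pos rfl]
      cases pd with
      | true =>
        rw [if_pos (rfl : true = true)]
        refine ⟨(ih e true ht he).1, fun z => ?_, (ih e true ht he).2.2⟩
        rw [h2T z, if_pos (rfl : true = true)]
        constructor
        · rintro ⟨hz, hne, hc⟩
          exact ⟨List.mem_cons_of_mem _ hz, hne, by rw [count_cons_ne _ _ _ hne]; exact hc⟩
        · rintro ⟨hz, hne, hc⟩
          rcases List.mem_cons.mp hz with rfl | hzt
          · exact absurd rfl hne
          · exact ⟨hzt, hne, by rwa [count_cons_ne _ _ _ hne] at hc⟩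
      | false =>
        rw [if_neg Bool.false_ne_true]
        refine ⟨?_, fun z => ?_, ?_⟩
        · refine List.pairwise_cons.mpr ⟨fun z hz => ?_, (ih e true ht he).1⟩
          have hm := (h2T z).mp hz
          exact lt_of_le_of_ne ((ih e true ht he).2.2 z hz) (Ne.symm hm.2.1)
        · rw [if_neg Bool.false_ne_true]
          constructor
          · intro hz
            rcases List.mem_cons.mp hz with rfl | hz'
            · exact ⟨List.mem_cons_self, Or.inl rfl⟩
            · obtain ⟨hzt, hne, hc⟩ := (h2T z).mp hz'
              refine ⟨List.mem_cons_of_mem _ hzt, Or.inr ?_⟩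
              rw [count_cons_ne _ _ _ hne]; exact hc
          · rintro ⟨hz, hze | hc⟩
            · exact hze ▸ List.mem_cons_self
            · by_cases hze : z = e
              · subst hze; exact List.mem_cons_self
              · rcases List.mem_cons.mp hz with rfl | hzt
                · exact absurd rfl hze
                · exact List.mem_cons_of_mem _
                    ((h2T z).mpr ⟨hzt, hze, by rwa [count_cons_ne _ _ _ hze] at hc⟩)
        · intro z hz
          rcases List.mem_cons.mp hz with rfl | hz'
          · exact le_refl z
          · exact (ih e true ht he).2.2 z hz'
    · have hne : e ≠ x := fun hh => h (by rw [hh])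
      have hxe : x < e := lt_of_le_of_ne (hx e (List.mem_cons_self)) (Ne.symm hne)
      rw [if_neg h]
      have key : ∀ z, z ∈ specD (some e) false t ↔ (z ∈ e :: t ∧ 2 ≤ (e :: t).count z) := by
        intro z
        rw [h2F z]
        constructor
        · rintro ⟨hzt, rfl | hc⟩
          · refine ⟨List.mem_cons_of_mem _ hzt, ?_⟩
            rw [count_cons_self']
            have := List.one_le_count_iff.mpr hzt
            omega
          · refine ⟨List.mem_cons_of_mem _ hzt, ?_⟩
            by_cases hze : z = e
            · subst hze; rw [count_cons_self']; omega
            · rw [count_cons_ne _ _ _ hze]; exact hc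
        · rintro ⟨hz, hc⟩
          by_cases hze : z = e
          · subst hze
            rw [count_cons_self'] at hc
            exact ⟨List.one_le_count_iff.mp (by omega), Or.inl rfl⟩
          · rcases List.mem_cons.mp hz with rfl | hzt
            · exact absurd rfl hze
            · rw [count_cons_ne _ _ _ hze] at hc
              exact ⟨hzt, Or.inr hc⟩
      have hzx_of : ∀ z ∈ e :: t, z ≠ x := by
        intro z hz
        have hlt : x < z := by
          rcases List.mem_cons.mp hz with rfl | hzt
          · exact hxe
          · exact lt_of_lt_of_le hxe (he z hzt)
        exact ne_of_gt hlt
      refine ⟨(ih e false ht he).1, fun z => ?_,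
        fun z hz => le_of_lt (lt_of_lt_of_le hxe ((ih e false ht he).2.2 z hz))⟩
      rw [key z]
      cases pd with
      | true =>
        rw [if_pos rfl]
        exact ⟨fun ⟨a, b⟩ => ⟨a, hzx_of z a, b⟩, fun ⟨a, _, c⟩ => ⟨a, c⟩⟩
      | false =>
        rw [if_neg Bool.false_ne_true]
        constructor
        · rintro ⟨a, b⟩; exact ⟨a, Or.inr b⟩
        · rintro ⟨a, rfl | c⟩
          · exact absurd rfl (hzx_of _ a)
          · exact ⟨a, c⟩

theorem specD_none_char (s : List String) (hs : s.Pairwise (· ≤ ·)) :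
    (specD none false s).Pairwise (· < ·) ∧
    (∀ z, z ∈ specD none false s ↔ (z ∈ s ∧ 2 ≤ s.count z)) := by
  cases s with
  | nil => simp [specD]
  | cons e t =>
    have he : ∀ y ∈ t, e ≤ y := fun y hy => (List.pairwise_cons.mp hs).1 y hy
    have ht : t.Pairwise (· ≤ ·) := (List.pairwise_cons.mp hs).2
    have h2F : ∀ z, z ∈ specD (some e) false t ↔ (z ∈ t ∧ (z = e ∨ 2 ≤ t.count z)) := by
      intro z; rw [(specD_some_char t e false ht he).2.1 z]; simp
    unfold specD
    rw [if_neg (by simp)]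
    refine ⟨(specD_some_char t e false ht he).1, fun z => ?_⟩
    rw [h2F z]
    constructor
    · rintro ⟨hzt, rfl | hc⟩
      · refine ⟨List.mem_cons_of_mem _ hzt, ?_⟩
        rw [count_cons_self']
        have := List.one_le_count_iff.mpr hzt
        omega
      · refine ⟨List.mem_cons_of_mem _ hzt, ?_⟩
        by_cases hze : z = e
        · subst hze; rw [count_cons_self']; omega
        · rw [count_cons_ne _ _ _ hze]; exact hc
    · rintro ⟨hz, hc⟩
      by_cases hze : z = e
      · subst hze
        rw [count_cons_self'] at hc
        exact ⟨List.one_le_count_iff.mp (by omega), Or.inl rfl⟩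
      · rcases List.mem_cons.mp hz with rfl | hzt
        · exact absurd rfl hze
        · rw [count_cons_ne _ _ _ hze] at hc
          exact ⟨hzt, Or.inr hc⟩

theorem separate_emails_eq_alt (email_list : List String) :
    separate_emails email_list = separate_emails_alt email_list := by
  unfold separate_emails separate_emails_alt
  simp only [sepAstep_eq, sepBstep_eq]
  have hsp : (PySem.List.sorted email_list (fun x => x) false).Pairwise (· ≤ ·) :=
    PySem.List.sorted_pairwise email_list (fun x => x)
  have hperm : (PySem.List.sorted email_list (fun x => x) false).Perm email_list :=
    PySem.List.sorted_perm email_list (fun x => x) false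
  rw [sepB_fold_fst, sepB_fold_snd, List.nil_append, List.nil_append]
  obtain ⟨hu1, hu2⟩ := specU_none_char _ hsp
  obtain ⟨hd1, hd2⟩ := specD_none_char _ hsp
  refine Prod.ext ?_ ?_
  · show PySem.List.sorted (email_list.foldl sepAstep (PySem.Set.empty, PySem.Set.empty)).1 _ _ = _
    rw [sepA_fold_fst, PySem.Set.update_empty]
    apply PySem.List.sorted_id_eq_of_perm_of_pairwise
    · refine (List.perm_ext_iff_of_nodup (hu1.imp ne_of_lt) (PySem.Set.nodup_ofList email_list)).mpr ?_
      intro z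
      rw [hu2 z, PySem.Set.mem_ofList]
      exact ⟨fun h => hperm.mem_iff.mp h, fun h => hperm.mem_iff.mpr h⟩
    · exact hu1.imp le_of_lt
  · show PySem.List.sorted (email_list.foldl sepAstep (PySem.Set.empty, PySem.Set.empty)).2 _ _ = _
    apply PySem.List.sorted_id_eq_of_perm_of_pairwise
    · refine (List.perm_ext_iff_of_nodup (hd1.imp ne_of_lt)
        (sepA_fold_snd_nodup email_list PySem.Set.empty PySem.Set.empty List.nodup_nil)).mpr ?_
      intro z
      rw [hd2 z, sepA_fold_snd_mem]
      simp only [PySem.Set.empty, List.not_mem_nil, false_and, false_or]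
      constructor
      · rintro ⟨hz, hc⟩
        exact (hperm.count_eq z) ▸ hc
      · intro hc
        have hc' : 2 ≤ (PySem.List.sorted email_list (fun x => x) false).count z :=
          (hperm.count_eq z).symm ▸ hc
        exact ⟨List.one_le_count_iff.mp (by omega), hc'⟩
    · exact hd1.imp le_of_lt

-- ===== VERDICT (by name: the statement is the Claim_ definition above) =====
theorem separate_emails_spec : Claim_equal_separate_emails := by
  intro email_list _
  exact separate_emails_eq_alt email_list
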